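-- pv_equiv track=rewrite | github.com/haihp02-zenai/qserve | scripts/envs/gin_rummy_opponent_modeling.py | find_all_melds
-- ===== SOURCE A (Python) =====
-- from collections import Counter, defaultdict
--
-- RANK_ORDER = ['A', '2', '3', '4', '5', '6', '7', '8', '9', 'T', 'J', 'Q', 'K']
--
-- def get_rank(card: str) -> str:
--     return card[0]
--
-- def get_suit(card: str) -> str:
--     return card[1]
--
-- def find_all_melds(hand: list[str]) -> list[frozenset[str]]:
--     """Enumerate every valid meld (SET or RUN of 3+ cards) from the given hand."""
--     melds: list[frozenset[str]] = []
--
--     rank_groups: dict[str, list[str]] = defaultdict(list)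
--     for card in hand:
--         rank_groups[get_rank(card)].append(card)
--     for cards in rank_groups.values():
--         if len(cards) >= 3:
--             melds.append(frozenset(cards[:3]))
--         if len(cards) >= 4:
--             melds.append(frozenset(cards[:4]))
--
--     suit_groups: dict[str, list[str]] = defaultdict(list)
--     for card in hand:
--         suit_groups[get_suit(card)].append(card)
--     for cards in suit_groups.values():
--         sorted_cards = sorted(cards, key=lambda c: RANK_ORDER.index(get_rank(c)))
--         i = 0
--         while i < len(sorted_cards):
--             run = [sorted_cards[i]]
--             j = i + 1
--             while j < len(sorted_cards):
--                 if RANK_ORDER.index(get_rank(sorted_cards[j])) == RANK_ORDER.index(get_rank(run[-1])) + 1: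
--                     run.append(sorted_cards[j])
--                     j += 1
--                 else:
--                     break
--             for start in range(len(run)):
--                 for end in range(start + 3, len(run) + 1):
--                     melds.append(frozenset(run[start:end]))
--             i = j if len(run) > 1 else i + 1
--
--     return melds
-- ===== SOURCE B (Python) =====
-- RANK_ORDER = ['A', '2', '3', '4', '5', '6', '7', '8', '9', 'T', 'J', 'Q', 'K']
--
--
-- def find_all_melds(hand: list[str]) -> list["frozenset[str]"]:
--     """Enumerate every valid meld (SET or RUN of 3+ cards) from the given hand."""
--     melds = []
--     rank_groups: dict = {}
--     suit_groups: dict = {}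
--     for card in hand:
--         rank_groups.setdefault(card[0], []).append(card)
--         suit_groups.setdefault(card[1], []).append(card)
--     for cards in rank_groups.values():
--         if len(cards) >= 3:
--             melds.append(frozenset(cards[:3]))
--         if len(cards) >= 4:
--             melds.append(frozenset(cards[:4]))
--     for cards in suit_groups.values():
--         sc = sorted(cards, key=lambda c: RANK_ORDER.index(c[0]))
--         n = len(sc)
--         for s in range(n):
--             for e in range(s + 3, n + 1):
--                 w = sc[s:e]
--                 if all(RANK_ORDER.index(w[k + 1][0]) == RANK_ORDER.index(w[k][0]) + 1
--                        for k in range(len(w) - 1)):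
--                     melds.append(frozenset(w))
--     return melds
-- ===== Notes on version B (the rewrite author's own statement) =====
-- stated objective: alternative
-- what changed: B builds the rank and suit groupings in one pass instead of two, and finds runs by a brute-force scan over every window sc[s:e] of each sorted suit checking internal consecutiveness, instead of A's two-index while loops that build maximal runs and then emit their sub-windows.
import Mathlib
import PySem

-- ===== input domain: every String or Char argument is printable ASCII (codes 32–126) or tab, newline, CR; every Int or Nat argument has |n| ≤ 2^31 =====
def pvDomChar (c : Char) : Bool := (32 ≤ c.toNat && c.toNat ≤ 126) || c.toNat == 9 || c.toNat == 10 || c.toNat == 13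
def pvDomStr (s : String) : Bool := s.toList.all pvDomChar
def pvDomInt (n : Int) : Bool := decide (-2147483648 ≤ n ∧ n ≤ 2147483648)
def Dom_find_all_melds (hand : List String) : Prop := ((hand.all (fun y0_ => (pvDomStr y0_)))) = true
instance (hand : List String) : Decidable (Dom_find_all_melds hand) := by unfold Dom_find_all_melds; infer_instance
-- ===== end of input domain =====

-- B replaces A's two grouping passes by one combined pass and A's maximal-run while loops by a
-- brute-force consecutive-window scan per sorted suit; objective: alternative (not claimed faster).

-- shared helpers (both Pythons use RANK_ORDER, card[0], card[1], RANK_ORDER.index)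
-- RANK_ORDER holds one-character strings; card[0] is one character, so ranks are modelled as Char (exact).
def pyRankChars : List Char := ['A', '2', '3', '4', '5', '6', '7', '8', '9', 'T', 'J', 'Q', 'K']

-- card[0]; Python raises IndexError on '' — excluded by Pre_, default only there
def getRank (card : String) : Char := (PySem.Str.pyGet? card 0).getD ' '

-- card[1]; Python raises IndexError on 1-char strings — excluded by Pre_
def getSuit (card : String) : Char := (PySem.Str.pyGet? card 1).getD ' '

-- RANK_ORDER.index(card[0]); Python raises ValueError when absent — excluded by Pre_
def rankIdx (card : String) : Nat := (PySem.List.index? pyRankChars (getRank card)).getD 0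

-- ===== PORT A =====
-- inner while: extend the run while the next rank is exactly one above the previous card's rank;
-- returns (cards consumed into the run, remaining suffix = position j)
def extendRun (prev : String) : List String → List String × List String
  | [] => ([], [])
  | y :: ys =>
    if rankIdx y == rankIdx prev + 1 then
      let p := extendRun y ys
      (y :: p.1, p.2)
    else ([], y :: ys)

theorem extendRun_snd_length_le (prev : String) (l : List String) :
    (extendRun prev l).2.length ≤ l.length := by
  induction l generalizing prev with
  | nil => simp [extendRun]
  | cons y ys ih =>
    simp only [extendRun]
    split
    · exact Nat.le_succ_of_le (ih y)
    · simp

-- for start in range(len(run)): for end in range(start+3, len(run)+1): melds.append(frozenset(run[start:end]))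
-- run[start:end] with 0 ≤ start ≤ end is exactly (run.drop start).take (end - start)
def windowsAll (run : List String) : List (List String) :=
  (List.range run.length).flatMap (fun s =>
    (List.range' (s + 3) (run.length - (s + 2))).map (fun e =>
      PySem.Set.ofList ((run.drop s).take (e - s))))

-- outer while over i: since j always ends at i + len(run), both branches of A's
-- 'i = j if len(run) > 1 else i + 1' continue at the suffix after the run
def emitRuns : List String → List (List String)
  | [] => []
  | x :: rest =>
    let p := extendRun x rest
    windowsAll (x :: p.1) ++ emitRuns p.2
termination_by l => l.length
decreasing_by
  simpa using Nat.lt_succ_of_le (extendRun_snd_length_le x rest)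

def find_all_melds (hand : List String) : List (List String) :=
  let rankGroups : PySem.Dict Char (List String) :=
    hand.foldl (fun d c => d.insert (getRank c) (d.getD (getRank c) [] ++ [c])) PySem.Dict.empty
  let melds : List (List String) :=
    rankGroups.values.foldl (fun ms cs =>
      let ms := if 3 ≤ cs.length then ms ++ [PySem.Set.ofList (cs.take 3)] else ms
      if 4 ≤ cs.length then ms ++ [PySem.Set.ofList (cs.take 4)] else ms) []
  let suitGroups : PySem.Dict Char (List String) :=
    hand.foldl (fun d c => d.insert (getSuit c) (d.getD (getSuit c) [] ++ [c])) PySem.Dict.empty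
  suitGroups.values.foldl (fun ms cs =>
    ms ++ emitRuns (PySem.List.sorted cs rankIdx)) melds

-- ===== PORT B =====
-- all(RANK_ORDER.index(w[k+1][0]) == RANK_ORDER.index(w[k][0]) + 1 for k in range(len(w)-1))
def consecB : List String → Bool
  | [] => true
  | [_] => true
  | a :: b :: t => (rankIdx b == rankIdx a + 1) && consecB (b :: t)

-- for s in range(n): for e in range(s+3, n+1): keep sc[s:e] iff internally consecutive
def windowScan (sc : List String) : List (List String) :=
  (List.range sc.length).flatMap (fun s =>
    (List.range' (s + 3) (sc.length - (s + 2))).filterMap (fun e =>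
      let w := (sc.drop s).take (e - s)
      if consecB w then some (PySem.Set.ofList w) else none))

def find_all_melds_alt (hand : List String) : List (List String) :=
  -- one pass builds both groupings (setdefault(k, []).append(card) = insert of getD-extended list)
  let gs : PySem.Dict Char (List String) × PySem.Dict Char (List String) :=
    hand.foldl (fun gs c =>
      (gs.1.insert (getRank c) (gs.1.getD (getRank c) [] ++ [c]),
       gs.2.insert (getSuit c) (gs.2.getD (getSuit c) [] ++ [c])))
      (PySem.Dict.empty, PySem.Dict.empty)
  let melds : List (List String) :=
    gs.1.values.foldl (fun ms cs =>
      let ms := if 3 ≤ cs.length then ms ++ [PySem.Set.ofList (cs.take 3)] else ms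
      if 4 ≤ cs.length then ms ++ [PySem.Set.ofList (cs.take 4)] else ms) []
  gs.2.values.foldl (fun ms cs =>
    ms ++ windowScan (PySem.List.sorted cs rankIdx)) melds

-- ===== PRECONDITION & SPEC =====
-- Pre_ excludes exactly the inputs on which the Python A raises: a card shorter than 2 characters
-- (IndexError on card[1]) or whose first character is not a rank (ValueError in RANK_ORDER.index).
def Pre_find_all_melds (hand : List String) : Prop :=
  ∀ c ∈ hand, 2 ≤ c.toList.length ∧ pyRankChars.contains (c.toList.headD ' ') = true
instance (hand : List String) : Decidable (Pre_find_all_melds hand) := by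
  unfold Pre_find_all_melds; infer_instance

def pvWitness_find_all_melds : List String := ["AS", "2S", "3S", "3H", "3D"]

def Spec_find_all_melds (hand : List String) (out : List (List String)) : Prop :=
  out = find_all_melds_alt hand
instance (hand : List String) (out : List (List String)) : Decidable (Spec_find_all_melds hand out) := by
  unfold Spec_find_all_melds; infer_instance

-- ===== CLAIM (what is proved, stated in full; the proofs are below) =====
def Claim_equal_find_all_melds : Prop :=
  ∀ (hand : List String), Dom_find_all_melds hand → Pre_find_all_melds hand →
    Spec_find_all_melds hand (find_all_melds hand)

-- ===== LEMMAS AND PROOFS =====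

-- the one-pass fold building both dicts equals the pair of A's two separate folds
theorem foldl_pair_groups : ∀ (hand : List String) (d1 d2 : PySem.Dict Char (List String)),
    hand.foldl (fun gs c =>
        (gs.1.insert (getRank c) (gs.1.getD (getRank c) [] ++ [c]),
         gs.2.insert (getSuit c) (gs.2.getD (getSuit c) [] ++ [c]))) (d1, d2)
      = (hand.foldl (fun d c => d.insert (getRank c) (d.getD (getRank c) [] ++ [c])) d1,
         hand.foldl (fun d c => d.insert (getSuit c) (d.getD (getSuit c) [] ++ [c])) d2) := by
  intro hand
  induction hand with
  | nil => intro d1 d2; rfl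
  | cons x t ih => intro d1 d2; simpa using ih _ _

-- consecB is the adjacent-pairs condition, index form
theorem consecB_iff (w : List String) :
    consecB w = true ↔ ∀ (k : Nat) (h : k + 1 < w.length), rankIdx (w[k + 1]) = rankIdx (w[k]) + 1 := by
  induction w with
  | nil => simp [consecB]
  | cons a t ih =>
    cases t with
    | nil => simp [consecB]
    | cons b t' =>
      simp only [consecB, Bool.and_eq_true, beq_iff_eq, ih]
      constructor
      · rintro ⟨h1, h2⟩ k hk
        cases k with
        | zero => simpa using h1
        | succ k => simpa using h2 k (by simpa using hk)
      · intro h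
        refine ⟨by simpa using h 0 (by simp), fun k hk => by simpa using h (k + 1) (by simpa using hk)⟩

theorem extendRun_split (prev : String) (l : List String) :
    (extendRun prev l).1 ++ (extendRun prev l).2 = l := by
  induction l generalizing prev with
  | nil => simp [extendRun]
  | cons y ys ih =>
    simp only [extendRun]
    split
    · simpa using ih y
    · simp

theorem extendRun_consec (prev : String) (l : List String) :
    consecB (prev :: (extendRun prev l).1) = true := by
  induction l generalizing prev with
  | nil => simp [extendRun, consecB]
  | cons y ys ih =>
    simp only [extendRun]
    split
    · rename_i hstep
      simpa [consecB, Nat.beq_eq] using ⟨by simpa using hstep, ih y⟩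
    · simp [consecB]

theorem extendRun_break (prev : String) (l : List String) (y : String) (ys : List String)
    (h : (extendRun prev l).2 = y :: ys) :
    rankIdx y ≠ rankIdx ((prev :: (extendRun prev l).1).getLast (by simp)) + 1 := by
  induction l generalizing prev with
  | nil => simp [extendRun] at h
  | cons z zs ih =>
    by_cases hstep : rankIdx z == rankIdx prev + 1
    · have h2 : (extendRun prev (z :: zs)).2 = (extendRun z zs).2 := by
        simp [extendRun, hstep]
      have h1 : (extendRun prev (z :: zs)).1 = z :: (extendRun z zs).1 := by
        simp [extendRun, hstep]
      rw [h2] at h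
      have := ih z h
      simpa [h1, List.getLast_cons] using this
    · have h2 : (extendRun prev (z :: zs)).2 = z :: zs := by
        simp [extendRun, hstep]
      have h1 : (extendRun prev (z :: zs)).1 = ([] : List String) := by
        simp [extendRun, hstep]
      rw [h2] at h
      obtain ⟨rfl, rfl⟩ : z = y ∧ zs = ys := by simpa using h
      simp only [h1]
      simpa using fun hcon => hstep (by simpa using hcon)

-- a contiguous window of an internally consecutive list is consecutive
theorem consecB_window (l : List String) (h : consecB l = true) (s e : Nat) :
    consecB ((l.drop s).take (e - s)) = true := by
  rw [consecB_iff] at h ⊢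
  intro k hk
  have hlen : k + 1 < (l.drop s).length := lt_of_lt_of_le hk (by simp [List.length_take])
  have hl : s + (k + 1) < l.length := by simp [List.length_drop] at hlen; omega
  have e1 : ((l.drop s).take (e - s))[k + 1] = l[s + (k + 1)] := by
    rw [List.getElem_take, List.getElem_drop]
  have e2 : ((l.drop s).take (e - s))[k]'(by omega) = l[s + k]'(by omega) := by
    rw [List.getElem_take, List.getElem_drop]
  rw [e1, e2]
  have := h (s + k) (by omega)
  simpa [Nat.add_assoc] using this

-- a window crossing the break between l and r is not consecutive
theorem consecB_window_cross (l r : List String) (y : String) (ys : List String) (hr : r = y :: ys)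
    (hl : l ≠ []) (s e : Nat) (hs : s < l.length) (he1 : l.length < e) (he2 : e ≤ l.length + r.length)
    (hbr : rankIdx y ≠ rankIdx (l.getLast hl) + 1) :
    consecB (((l ++ r).drop s).take (e - s)) = false := by
  by_contra hcon
  have hc : consecB (((l ++ r).drop s).take (e - s)) = true := by
    cases hx : consecB (((l ++ r).drop s).take (e - s)) with
    | false => exact absurd hx hcon
    | true => rfl
  rw [consecB_iff] at hc
  set k := l.length - 1 - s with hk
  have hlenw : (((l ++ r).drop s).take (e - s)).length = e - s := by
    simp [List.length_take, List.length_drop]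
    omega
  have hk1 : k + 1 < e - s := by omega
  have hx1 : (((l ++ r).drop s).take (e - s))[k + 1]'(by omega) = (l ++ r)[s + (k + 1)]'(by simp; omega) := by
    rw [List.getElem_take, List.getElem_drop]
  have hx2 : (((l ++ r).drop s).take (e - s))[k]'(by omega) = (l ++ r)[s + k]'(by simp; omega) := by
    rw [List.getElem_take, List.getElem_drop]
  have hsk1 : s + (k + 1) = l.length := by omega
  have hsk : s + k = l.length - 1 := by omega
  have hy : (l ++ r)[s + (k + 1)]'(by simp; omega) = y := by
    have : (l ++ r)[s + (k + 1)]'(by simp; omega) = r[s + (k + 1) - l.length]'(by simp [hsk1, hr]) :=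
      List.getElem_append_right (by omega)
    rw [this]
    simp [hsk1, hr]
  have hlast : (l ++ r)[s + k]'(by simp; omega) = l.getLast hl := by
    have : (l ++ r)[s + k]'(by simp; omega) = l[s + k]'(by omega) :=
      List.getElem_append_left (by omega)
    rw [this, List.getLast_eq_getElem]
    congr 1
  have := hc k (by omega)
  rw [hx1, hx2, hy, hlast] at this
  exact hbr this

theorem filterMap_if_le {γ : Type} (g : Nat → γ) (B : Nat) :
    ∀ (n a : Nat), (List.range' a n).filterMap (fun e => if e ≤ B then some (g e) else none)
      = (List.range' a (min n (B + 1 - a))).map g := by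
  intro n
  induction n with
  | zero => intro a; simp
  | succ n ih =>
    intro a
    rw [List.range'_succ, List.filterMap_cons]
    by_cases ha : a ≤ B
    · have hmin : min (n + 1) (B + 1 - a) = (min n (B + 1 - (a + 1))) + 1 := by omega
      rw [hmin, List.range'_succ, List.map_cons]
      simp only [ha, if_pos]
      rw [ih (a + 1)]
    · have hmin : min (n + 1) (B + 1 - a) = 0 := by omega
      have hmin2 : min n (B + 1 - (a + 1)) = 0 := by omega
      simp only [ha, if_neg, not_false_iff]
      rw [ih (a + 1), hmin, hmin2]
      simp

theorem windowScan_split (l r : List String) (hl : l ≠ []) (hc : consecB l = true)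
    (hbr : ∀ (y : String) (ys : List String), r = y :: ys →
      rankIdx y ≠ rankIdx (l.getLast hl) + 1) :
    windowScan (l ++ r) = windowsAll l ++ windowScan r := by
  unfold windowScan windowsAll
  have hlen : (l ++ r).length = l.length + r.length := by simp
  rw [hlen, List.range_add, List.flatMap_append]
  congr 1
  -- part 1: windows starting inside l
  · apply List.flatMap_congr
    intro s hs
    rw [List.mem_range] at hs
    have hstep1 : ∀ e ∈ List.range' (s + 3) (l.length + r.length - (s + 2)),
        (fun e => if consecB (((l ++ r).drop s).take (e - s)) then
            some (PySem.Set.ofList (((l ++ r).drop s).take (e - s))) else none) e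
        = (fun e => if e ≤ l.length then
            some (PySem.Set.ofList ((l.drop s).take (e - s))) else none) e := by
      intro e he
      rw [List.mem_range'_1] at he
      by_cases hel : e ≤ l.length
      · have hdrop : (l ++ r).drop s = l.drop s ++ r :=
          List.drop_append_of_le_length (le_of_lt hs)
        have htake : (l.drop s ++ r).take (e - s) = (l.drop s).take (e - s) :=
          List.take_append_of_le_length (by simp [List.length_drop]; omega)
        simp only [hdrop, htake, consecB_window l hc s e, if_pos, hel]
      · cases r with
        | nil =>
          exfalso
          simp only [List.length_nil, Nat.add_zero] at he
          omega
        | cons y ys =>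
          have he2 : e ≤ l.length + (y :: ys).length := by
            simp only [List.length_cons] at he ⊢
            omega
          have hcross := consecB_window_cross l (y :: ys) y ys rfl hl s e hs (by omega)
            he2 (hbr y ys rfl)
          simp only [hcross, Bool.false_eq_true, if_neg, not_false_iff, hel, if_neg]
    rw [List.filterMap_congr hstep1,
      filterMap_if_le (fun e => PySem.Set.ofList ((l.drop s).take (e - s))) l.length
        (l.length + r.length - (s + 2)) (s + 3)]
    have hmin : min (l.length + r.length - (s + 2)) (l.length + 1 - (s + 3)) = l.length - (s + 2) := by
      omega
    rw [hmin]
  -- part 2: windows starting inside r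
  · rw [List.flatMap_map]
    apply List.flatMap_congr
    intro s' hs'
    rw [List.mem_range] at hs'
    have hcnt : l.length + r.length - (l.length + s' + 2) = r.length - (s' + 2) := by omega
    have hrange : List.range' (l.length + s' + 3) (r.length - (s' + 2))
        = (List.range' (s' + 3) (r.length - (s' + 2))).map (fun x => l.length + x) := by
      rw [List.map_add_range', Nat.add_assoc]
    rw [hcnt, hrange, List.filterMap_map]
    apply List.filterMap_congr
    intro e' he'
    rw [List.mem_range'_1] at he'
    have hdrop : (l ++ r).drop (l.length + s') = r.drop s' := by
      rw [List.drop_append]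
      simp
    have hsub : l.length + e' - (l.length + s') = e' - s' := by omega
    simp only [Function.comp, hdrop, hsub]

theorem emitRuns_eq_windowScan (xs : List String) : emitRuns xs = windowScan xs := by
  induction xs using emitRuns.induct with
  | case1 => simp [emitRuns, windowScan]
  | case2 x rest p ih =>
    have hsplit : (x :: (extendRun x rest).1) ++ (extendRun x rest).2 = x :: rest := by
      simpa using extendRun_split x rest
    calc emitRuns (x :: rest)
        = windowsAll (x :: (extendRun x rest).1) ++ emitRuns (extendRun x rest).2 := by
          rw [emitRuns]
      _ = windowsAll (x :: (extendRun x rest).1) ++ windowScan (extendRun x rest).2 := by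
          rw [ih]
      _ = windowScan ((x :: (extendRun x rest).1) ++ (extendRun x rest).2) :=
          (windowScan_split _ _ (by simp) (extendRun_consec x rest)
            (fun y ys hy => extendRun_break x rest y ys hy)).symm
      _ = windowScan (x :: rest) := by rw [hsplit]

-- ===== VERDICT (by name: the statement is the Claim_ definition above) =====
theorem find_all_melds_spec : Claim_equal_find_all_melds := by
  intro hand _ _
  unfold Spec_find_all_melds find_all_melds find_all_melds_alt
  rw [foldl_pair_groups hand PySem.Dict.empty PySem.Dict.empty]
  simp only [emitRuns_eq_windowScan]
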